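-- pv_equiv track=rewrite | github.com/ayoubzulfiqar/Leetcode-Medium | LongestCommonPrefixAfteratMostOneRemoval/longest_common_prefix_after_at_most_one_removal.py | longestCommonPrefixAfterOneRemoval
-- ===== SOURCE A (Python) =====
-- def longestCommonPrefixAfterOneRemoval(strs: list[str]) -> int:
--     def find_lcp_length(string_list):
--         if not string_list:
--             return 0
--         if len(string_list) == 1:
--             return len(string_list[0])
--
--         min_len = float('inf')
--         for s in string_list:
--             min_len = min(min_len, len(s))
--
--         if min_len == 0:
--             return 0
--
--         lcp_len = 0
--         for i in range(min_len):
--             char_at_i = string_list[0][i]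
--             for j in range(1, len(string_list)):
--                 if string_list[j][i] != char_at_i:
--                     return lcp_len
--             lcp_len += 1
--         return lcp_len
--
--     if not strs:
--         return 0
--
--     max_lcp_len = find_lcp_length(strs)
--
--     num_strings = len(strs)
--
--     for i in range(num_strings):
--         original_str = strs[i]
--
--         if not original_str:
--             continue
--
--         for j in range(len(original_str)):
--             modified_str = original_str[:j] + original_str[j+1:]
--
--             temp_strs = list(strs)
--             temp_strs[i] = modified_str
--
--             current_lcp_len = find_lcp_length(temp_strs)
--             max_lcp_len = max(max_lcp_len, current_lcp_len)
--
--     return max_lcp_len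
-- ===== SOURCE B (Python) =====
-- def longestCommonPrefixAfterOneRemoval(strs: list[str]) -> int:
--     n = len(strs)
--     if n == 0:
--         return 0
--     if n == 1:
--         return len(strs[0])
--
--     def lcp2(a, b):
--         k = 0
--         m = min(len(a), len(b))
--         while k < m and a[k] == b[k]:
--             k += 1
--         return k
--
--     # pre[i] = LCP(strs[0..i]), via reference strs[0]; suf[i] = LCP(strs[i..n-1]), via reference strs[n-1]
--     pre = [0] * n
--     pre[0] = len(strs[0])
--     for i in range(1, n):
--         pre[i] = min(pre[i - 1], lcp2(strs[0], strs[i]))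
--     suf = [0] * n
--     suf[n - 1] = len(strs[n - 1])
--     for i in range(n - 2, -1, -1):
--         suf[i] = min(suf[i + 1], lcp2(strs[n - 1], strs[i]))
--     cross = lcp2(strs[0], strs[n - 1])
--
--     best = pre[n - 1]  # base LCP, no removal
--     for i in range(n):
--         if i == 0:
--             r, rep = suf[1], strs[n - 1]
--         elif i == n - 1:
--             r, rep = pre[n - 2], strs[0]
--         else:
--             r, rep = min(pre[i - 1], cross, suf[i + 1]), strs[0]
--         s = strs[i]
--         for j in range(len(s)):
--             u = s[:j] + s[j + 1:]
--             cand = min(r, lcp2(u, rep))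
--             if cand > best:
--                 best = cand
--     return best
-- ===== Notes on version B (the rewrite author's own statement) =====
-- stated objective: faster
-- what changed: Instead of rebuilding the whole list and rescanning all n strings column by column for every single-character deletion, B precomputes prefix/suffix LCP tables and the base LCP once, and evaluates each deletion with one direct two-string LCP against a representative of the other strings.
import Mathlib
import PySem

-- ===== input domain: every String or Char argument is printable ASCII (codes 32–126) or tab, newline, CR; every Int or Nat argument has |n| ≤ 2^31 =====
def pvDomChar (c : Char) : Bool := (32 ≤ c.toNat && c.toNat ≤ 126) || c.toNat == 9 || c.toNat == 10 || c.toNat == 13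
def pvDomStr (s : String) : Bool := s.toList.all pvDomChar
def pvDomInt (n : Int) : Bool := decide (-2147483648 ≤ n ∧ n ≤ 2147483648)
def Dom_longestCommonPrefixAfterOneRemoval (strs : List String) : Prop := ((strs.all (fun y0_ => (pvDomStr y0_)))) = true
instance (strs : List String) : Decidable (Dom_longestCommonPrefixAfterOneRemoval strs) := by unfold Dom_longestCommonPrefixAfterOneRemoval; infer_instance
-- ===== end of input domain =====

-- B replaces A's rebuild-and-rescan of the whole list per deletion by prefix/suffix LCP tables
-- plus one direct two-string LCP per deletion (objective: faster; measured).


-- ===== PORT A =====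

-- min_len = inf; for s in string_list: min_len = min(min_len, len(s))   (none plays float('inf'))
def pvMinLen (l : List (List Char)) : Option Nat :=
  l.foldl (fun m s => match m with | none => some s.length | some k => some (min k s.length)) none

-- inner 'for j in range(1, len)' loop: all other strings agree with char_at_i at column i
-- (the early 'return lcp_len' is the fold's short-circuit; x[i]? is in range whenever Python's x[i] is)
def pvAllEqAt (rest : List (List Char)) (i : Nat) (c : Char) : Bool :=
  rest.all (fun x => x[i]? == some c)

-- 'for i in range(min_len)' column loop; returns lcp_len (= i at the first mismatch, else stop)
def pvColLoop (l0 : List Char) (rest : List (List Char)) (stop : Nat) (i : Nat) : Nat :=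
  if _h : i < stop then
    match l0[i]? with
    | some c => if pvAllEqAt rest i c then pvColLoop l0 rest stop (i + 1) else i
    | none => i   -- unreachable: i < stop ≤ (length of every string)
  else i
termination_by stop - i
decreasing_by omega

-- find_lcp_length
def pvFindLcp (l : List (List Char)) : Nat :=
  match l with
  | [] => 0
  | s :: rest =>
      if rest.isEmpty then s.length   -- the len(string_list) == 1 branch
      else
        -- pvMinLen of a nonempty list is always `some`; `getD 0` only unwraps it
        let m := (pvMinLen (s :: rest)).getD 0
        if m = 0 then 0 else pvColLoop s rest m 0

-- main body of A on the char-list level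
def pvMainA (l : List (List Char)) : Nat :=
  if l.length = 0 then 0
  else
    (List.range l.length).foldl (fun acc i =>
      let s := l.getD i []
      if s.length = 0 then acc
      else (List.range s.length).foldl (fun acc2 (j : Nat) =>
        let modified := PySem.List.slice s none (some (j : Int)) ++
                        PySem.List.slice s (some ((j : Int) + 1)) none
        let temp := l.set i modified
        max acc2 (pvFindLcp temp)) acc) (pvFindLcp l)

def longestCommonPrefixAfterOneRemoval (strs : List String) : Int :=
  (pvMainA (strs.map (·.toList)) : Int)

-- ===== PORT B =====

-- Source B's lcp2: the scanning while loop as the obvious structural recursion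
def pvLcp : List Char → List Char → Nat
  | x :: a, y :: b => if x = y then pvLcp a b + 1 else 0
  | _, _ => 0

-- pre[i] = min(pre[i-1], lcp2(strs[0], strs[i])), pre[0] = len(strs[0])
def pvPreArr (s0 : List Char) (l : List (List Char)) : Nat → Nat
  | 0 => s0.length
  | i + 1 => min (pvPreArr s0 l i) (pvLcp s0 (l.getD (i + 1) []))

-- suf indexed by distance from the end: pvSufArr … k = suf[n-1-k]
def pvSufArr (sl : List Char) (l : List (List Char)) (n : Nat) : Nat → Nat
  | 0 => sl.length
  | k + 1 => min (pvSufArr sl l n k) (pvLcp sl (l.getD (n - 1 - (k + 1)) []))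

def pvMainB (l : List (List Char)) : Nat :=
  let n := l.length
  if n = 0 then 0
  else if n = 1 then (l.getD 0 []).length
  else
    let s0 := l.getD 0 []
    let sl := l.getD (n - 1) []
    let pre := pvPreArr s0 l
    let suf := fun i => pvSufArr sl l n (n - 1 - i)
    let cross := pvLcp s0 sl
    (List.range n).foldl (fun best i =>
      let r := if i = 0 then suf 1
               else if i = n - 1 then pre (n - 2)
               else min (pre (i - 1)) (min cross (suf (i + 1)))
      let rep := if i = 0 then sl else s0
      let s := l.getD i []
      (List.range s.length).foldl (fun best2 (j : Nat) =>
        let u := PySem.List.slice s none (some (j : Int)) ++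
                 PySem.List.slice s (some ((j : Int) + 1)) none
        let cand := min r (pvLcp u rep)
        if best2 < cand then cand else best2) best) (pre (n - 1))

def longestCommonPrefixAfterOneRemoval_alt (strs : List String) : Int :=
  (pvMainB (strs.map (·.toList)) : Int)

-- ===== PRECONDITION & SPEC =====
def Spec_longestCommonPrefixAfterOneRemoval (strs : List String) (out : Int) : Prop := out = longestCommonPrefixAfterOneRemoval_alt strs
instance (strs : List String) (out : Int) : Decidable (Spec_longestCommonPrefixAfterOneRemoval strs out) := by unfold Spec_longestCommonPrefixAfterOneRemoval; infer_instance

-- ===== CLAIM (what is proved, stated in full; the proofs are below) =====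
def Claim_equal_longestCommonPrefixAfterOneRemoval : Prop := ∀ (strs : List String), Dom_longestCommonPrefixAfterOneRemoval strs → Spec_longestCommonPrefixAfterOneRemoval strs (longestCommonPrefixAfterOneRemoval strs)

-- ===== LEMMAS AND PROOFS =====

-- ---- basic facts about pvLcp (the length of the longest common prefix of two char lists) ----

theorem pvLcp_nil_left (b : List Char) : pvLcp [] b = 0 := by cases b <;> rfl

theorem pvLcp_nil_right (a : List Char) : pvLcp a [] = 0 := by cases a <;> rfl

theorem pvLcp_cons (x y : Char) (a b : List Char) :
    pvLcp (x :: a) (y :: b) = if x = y then pvLcp a b + 1 else 0 := rfl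

theorem pvLcp_le_left : ∀ (a b : List Char), pvLcp a b ≤ a.length
  | [], b => by simp [pvLcp_nil_left]
  | x :: a, [] => by simp [pvLcp_nil_right]
  | x :: a, y :: b => by
      have := pvLcp_le_left a b
      simp only [pvLcp_cons, List.length_cons]
      split <;> omega

theorem pvLcp_comm : ∀ (a b : List Char), pvLcp a b = pvLcp b a
  | [], b => by simp [pvLcp_nil_left, pvLcp_nil_right]
  | x :: a, [] => by simp [pvLcp_nil_left, pvLcp_nil_right]
  | x :: a, y :: b => by
      have := pvLcp_comm a b
      simp only [pvLcp_cons]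
      by_cases h : x = y
      · subst h; simp [this]
      · rw [if_neg h, if_neg (fun hyx => h hyx.symm)]

theorem pvLcp_le_right (a b : List Char) : pvLcp a b ≤ b.length := by
  rw [pvLcp_comm]; exact pvLcp_le_left b a

-- the ultrametric identity: among the three pairwise lcps the minimum is attained twice
theorem pvUltra : ∀ (a b c : List Char),
    min (pvLcp a b) (pvLcp a c) = min (pvLcp a b) (pvLcp b c)
  | [], b, c => by simp [pvLcp_nil_left]
  | x :: a, [], c => by simp [pvLcp_nil_left, pvLcp_nil_right]
  | x :: a, y :: b, [] => by simp [pvLcp_nil_right]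
  | x :: a, y :: b, z :: c => by
      have ih := pvUltra a b c
      simp only [pvLcp_cons]
      by_cases hxy : x = y
      · subst hxy
        by_cases hxz : x = z
        · subst hxz; simp; omega
        · simp [hxz]
      · by_cases hxz : x = z
        · subst hxz; simp [hxy]
        · simp [hxy, hxz]

theorem pvLcp_lt_iff : ∀ (i : Nat) (a b : List Char), i ≤ pvLcp a b →
    (i < pvLcp a b ↔ ∃ c, a[i]? = some c ∧ b[i]? = some c)
  | 0, a, b => by
      intro _
      cases a with
      | nil => simp [pvLcp_nil_left]
      | cons x a =>
        cases b with
        | nil => simp [pvLcp_nil_right]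
        | cons y b =>
          simp only [pvLcp_cons, List.getElem?_cons_zero]
          by_cases h : x = y
          · subst h; simp
          · rw [if_neg h]
            constructor
            · intro h0; exact absurd h0 (by omega)
            · rintro ⟨c, hc1, hc2⟩
              have h1 := Option.some_inj.mp hc1
              have h2 := Option.some_inj.mp hc2
              exact absurd (h1.trans h2.symm) h
  | i + 1, a, b => by
      intro h
      cases a with
      | nil => simp [pvLcp_nil_left] at h
      | cons x a =>
        cases b with
        | nil => simp [pvLcp_nil_right] at h
        | cons y b =>
          simp only [pvLcp_cons] at h ⊢
          by_cases hxy : x = y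
          · rw [if_pos hxy] at h ⊢
            simp only [List.getElem?_cons_succ]
            have := pvLcp_lt_iff i a b (by omega)
            constructor
            · intro hlt; exact (this.mp (by omega))
            · intro he; have := this.mpr he; omega
          · rw [if_neg hxy] at h; omega

-- ---- pvGmin a l : LCP length of the list (a :: l), written with reference string a ----

def pvGmin (a : List Char) (l : List (List Char)) : Nat :=
  l.foldl (fun m x => min m (pvLcp a x)) a.length

theorem pvFoldlMin (a : List Char) :
    ∀ (l : List (List Char)) (c d : Nat),
      l.foldl (fun m x => min m (pvLcp a x)) (min c d) =
        min c (l.foldl (fun m x => min m (pvLcp a x)) d) := by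
  intro l
  induction l with
  | nil => intro c d; simp
  | cons x l ih =>
    intro c d
    simp only [List.foldl_cons]
    rw [min_assoc, ih]

theorem pvGmin_nil (a : List Char) : pvGmin a [] = a.length := rfl

theorem pvGmin_cons (a x : List Char) (l : List (List Char)) :
    pvGmin a (x :: l) = min (pvLcp a x) (pvGmin a l) := by
  unfold pvGmin
  simp only [List.foldl_cons]
  rw [min_comm a.length, pvFoldlMin]

theorem pvGmin_append_singleton (a x : List Char) (l : List (List Char)) :
    pvGmin a (l ++ [x]) = min (pvGmin a l) (pvLcp a x) := by
  unfold pvGmin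
  rw [List.foldl_append]
  rfl

theorem pvGmin_le_len (a : List Char) (l : List (List Char)) : pvGmin a l ≤ a.length := by
  induction l with
  | nil => simp [pvGmin_nil]
  | cons x l ih => rw [pvGmin_cons]; omega

theorem pvGmin_le_mem (a w : List Char) (l : List (List Char)) (hw : w ∈ l) :
    pvGmin a l ≤ pvLcp a w := by
  induction l with
  | nil => cases hw
  | cons x l ih =>
    rw [pvGmin_cons]
    rcases List.mem_cons.mp hw with h | h
    · subst h; omega
    · have := ih h; omega

theorem pvGmin_ge (a : List Char) (l : List (List Char)) (c : Nat)
    (h1 : c ≤ a.length) (h2 : ∀ x ∈ l, c ≤ pvLcp a x) : c ≤ pvGmin a l := by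
  induction l with
  | nil => simpa [pvGmin_nil]
  | cons x l ih =>
    rw [pvGmin_cons]
    have hx := h2 x (by simp)
    have := ih (fun x hx => h2 x (by simp [hx]))
    omega

theorem pvExchange : ∀ (l : List (List Char)) (a b : List Char),
    min (pvLcp a b) (pvGmin a l) = min (pvLcp a b) (pvGmin b l) := by
  intro l
  induction l with
  | nil =>
    intro a b
    have h1 := pvLcp_le_left a b
    have h2 := pvLcp_le_right a b
    simp only [pvGmin_nil]
    omega
  | cons x l ih =>
    intro a b
    rw [pvGmin_cons, pvGmin_cons]
    have hu := pvUltra a b x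
    have hih := ih a b
    omega

-- ---- pvP : LCP length of a (nonempty) list of strings ----

def pvP : List (List Char) → Nat
  | [] => 0
  | a :: l => pvGmin a l

theorem pvP_cons (a : List Char) (l : List (List Char)) : pvP (a :: l) = pvGmin a l := rfl

-- any representative w of the rest works
theorem pvP_rep (u b w : List Char) (l : List (List Char)) (hw : w ∈ b :: l) :
    pvP (u :: b :: l) = min (pvLcp u w) (pvP (b :: l)) := by
  rw [pvP_cons, pvP_cons, pvGmin_cons]
  have he := pvExchange l u b
  rcases List.mem_cons.mp hw with h | h
  · subst h; omega
  · have hG := pvGmin_le_mem b w l h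
    have h1 := pvUltra u b w
    have h2 := pvUltra b w u
    rw [pvLcp_comm b u] at h2
    rw [pvLcp_comm w u] at h2
    omega

theorem pvP_perm {l₁ l₂ : List (List Char)} (h : l₁.Perm l₂) : pvP l₁ = pvP l₂ := by
  induction h with
  | nil => rfl
  | cons x h ih =>
    rename_i t₁ t₂
    cases t₁ with
    | nil =>
      have ht : t₂ = [] := List.Perm.eq_nil h.symm
      subst ht; rfl
    | cons b s =>
      have hb2 : b ∈ t₂ := h.subset (by simp)
      cases t₂ with
      | nil => cases hb2
      | cons c s' =>
        rw [pvP_rep x b b s (by simp), pvP_rep x c b s' hb2, ih]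
  | swap x y l =>
    rw [pvP_cons, pvP_cons, pvGmin_cons, pvGmin_cons]
    rw [pvLcp_comm y x]
    have := pvExchange l x y
    omega
  | trans _ _ ih1 ih2 => exact ih1.trans ih2

theorem pvP_merge (A' : List (List Char)) (a : List Char) :
    ∀ (b : List Char) (B' : List (List Char)) (w : List Char), w ∈ b :: B' →
      pvP ((a :: A') ++ b :: B') = min (pvP (a :: A')) (min (pvLcp a w) (pvP (b :: B'))) := by
  induction A' generalizing a with
  | nil =>
    intro b B' w hw
    rw [List.singleton_append, pvP_rep a b w B' hw]
    have h1 : pvLcp a w ≤ a.length := pvLcp_le_left a w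
    simp only [pvP_cons, pvGmin_nil]
    omega
  | cons x A'' ih =>
    intro b B' w hw
    have hL : pvP ((a :: x :: A'') ++ b :: B') =
        min (pvLcp a x) (pvP ((x :: A'') ++ b :: B')) := by
      simp only [List.cons_append, pvP_cons, pvGmin_cons]
      have := pvExchange (A'' ++ b :: B') a x
      omega
    have hR : pvP (a :: x :: A'') = min (pvLcp a x) (pvP (x :: A'')) := by
      simp only [pvP_cons, pvGmin_cons]
      have := pvExchange A'' a x
      omega
    rw [hL, ih x b B' w hw, hR]
    have hu := pvUltra x a w
    rw [pvLcp_comm x a] at hu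
    omega

-- ---- the A side: find_lcp_length computes pvP ----

theorem pvMinLen_fold : ∀ (l : List (List Char)) (k : Nat),
    l.foldl (fun m s => match m with | none => some s.length | some k => some (min k s.length))
      (some k) = some ((l.map List.length).foldl min k) := by
  intro l
  induction l with
  | nil => intro k; rfl
  | cons x l ih => intro k; simp only [List.foldl_cons, List.map_cons]; exact ih _

theorem pvMinLen_eq (s : List Char) (rest : List (List Char)) :
    pvMinLen (s :: rest) = some ((rest.map List.length).foldl min s.length) := by
  unfold pvMinLen
  simp only [List.foldl_cons]
  exact pvMinLen_fold rest s.length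

theorem pvColLoop_eq (l0 : List Char) (rest : List (List Char)) (stop : Nat)
    (hs0 : stop ≤ l0.length) (hs : ∀ x ∈ rest, stop ≤ x.length) :
    ∀ (n i : Nat), stop - i = n → i ≤ stop → (∀ x ∈ rest, i ≤ pvLcp l0 x) →
      pvColLoop l0 rest stop i = min stop (pvGmin l0 rest) := by
  intro n
  induction n with
  | zero =>
    intro i hni hi hinv
    have hstop : ¬ i < stop := by omega
    unfold pvColLoop
    rw [dif_neg hstop]
    have hge : stop ≤ pvGmin l0 rest := pvGmin_ge l0 rest stop hs0 (fun x hx => by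
      have := hinv x hx; omega)
    omega
  | succ n ihn =>
    intro i hni hi hinv
    have hlt : i < stop := by omega
    have hil : i < l0.length := by omega
    unfold pvColLoop
    rw [dif_pos hlt, List.getElem?_eq_getElem hil]
    simp only []
    by_cases hall : pvAllEqAt rest i l0[i]
    · rw [if_pos hall]
      apply ihn (i + 1) (by omega) (by omega)
      intro x hx
      have hxi : x[i]? = some l0[i] := by
        have := (List.all_eq_true.mp hall) x hx
        simpa using this
      have := (pvLcp_lt_iff i l0 x (hinv x hx)).mpr
        ⟨l0[i], List.getElem?_eq_getElem hil, hxi⟩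
      omega
    · rw [if_neg hall]
      unfold pvAllEqAt at hall
      rw [List.all_eq_true] at hall
      push Not at hall
      obtain ⟨x, hx, hne⟩ := hall
      have hxne : ¬ x[i]? = some l0[i] := by simpa using hne
      have hlcp : pvLcp l0 x = i := by
        have hle := hinv x hx
        by_contra hcon
        have hlt2 : i < pvLcp l0 x := by omega
        obtain ⟨c, hc1, hc2⟩ := (pvLcp_lt_iff i l0 x hle).mp hlt2
        rw [List.getElem?_eq_getElem hil] at hc1
        exact hxne (by rw [hc2, ← Option.some_inj.mp hc1])
      have hle1 : pvGmin l0 rest ≤ i := by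
        have := pvGmin_le_mem l0 x rest hx; omega
      have hge : i ≤ pvGmin l0 rest := pvGmin_ge l0 rest i (by omega) hinv
      omega

theorem pvFindLcp_eq : ∀ (l : List (List Char)), pvFindLcp l = pvP l
  | [] => rfl
  | [s] => by
      simp [pvFindLcp, pvP_cons, pvGmin_nil]
  | s :: x :: t => by
      have h1 : pvFindLcp (s :: x :: t) =
          (if ((x :: t).map List.length).foldl min s.length = 0 then 0
           else pvColLoop s (x :: t) (((x :: t).map List.length).foldl min s.length) 0) := by
        show (if (x :: t).isEmpty then s.length
              else
                let m := (pvMinLen (s :: x :: t)).getD 0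
                if m = 0 then 0 else pvColLoop s (x :: t) m 0) = _
        rw [pvMinLen_eq]
        rfl
      rw [h1]
      have hmle := PySem.List.foldl_min_le ((x :: t).map List.length) s.length
      have hmm := PySem.List.foldl_min_mem ((x :: t).map List.length) s.length
      have hle_rest : ∀ y ∈ x :: t, ((x :: t).map List.length).foldl min s.length ≤ y.length := by
        intro y hy
        exact hmle.2 y.length (List.mem_map.mpr ⟨y, hy, rfl⟩)
      have hglem : pvGmin s (x :: t) ≤ ((x :: t).map List.length).foldl min s.length := by
        rcases hmm with h | h
        · rw [h]; exact pvGmin_le_len s (x :: t)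
        · obtain ⟨y, hy, hylen⟩ := List.mem_map.mp h
          have h2 := pvGmin_le_mem s y (x :: t) hy
          have h3 := pvLcp_le_right s y
          omega
      by_cases hm0 : ((x :: t).map List.length).foldl min s.length = 0
      · rw [if_pos hm0, pvP_cons]; omega
      · rw [if_neg hm0]
        rw [pvColLoop_eq s (x :: t) _ hmle.1 hle_rest _ 0 rfl (by omega)
          (fun x _ => Nat.zero_le _), pvP_cons]
        omega

-- foldl of max with candidates all ≤ acc stays acc (used for the one-string case)
theorem pvFoldMax_le (g : Nat → Nat) :
    ∀ (js : List Nat) (acc : Nat), (∀ j ∈ js, g j ≤ acc) →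
      js.foldl (fun a j => max a (g j)) acc = acc := by
  intro js
  induction js with
  | nil => intro acc _; rfl
  | cons j js ih =>
    intro acc h
    simp only [List.foldl_cons]
    have h1 : max acc (g j) = acc := by have := h j (by simp); omega
    rw [h1]
    exact ih acc (fun j hj => h j (by simp [hj]))

-- ---- the B side: pre/suf arrays compute pvGmin of segments ----

theorem pvPre_eq (l : List (List Char)) :
    ∀ (i : Nat), i < l.length →
      pvPreArr (l.getD 0 []) l i = pvGmin (l.getD 0 []) ((l.drop 1).take i) := by
  intro i
  induction i with
  | zero => intro _; simp [pvPreArr, pvGmin_nil]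
  | succ i ih =>
    intro hi
    have hii : i < l.length := by omega
    simp only [pvPreArr]
    rw [ih hii]
    have hdi : (l.drop 1)[i]? = some l[i + 1] := by
      rw [List.getElem?_drop, Nat.add_comm 1 i]
      exact List.getElem?_eq_getElem (by omega)
    rw [List.take_add_one, hdi]
    simp only [Option.toList_some]
    rw [pvGmin_append_singleton]
    congr 1
    rw [List.getD_eq_getElem l [] hi]

theorem pvLastMemDrop (l : List (List Char)) (d : Nat) (h1 : 1 ≤ l.length)
    (hd : d ≤ l.length - 1) : l.getD (l.length - 1) [] ∈ l.drop d := by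
  rw [List.getD_eq_getElem l [] (by omega)]
  have h2 : (l.drop d)[l.length - 1 - d]'(by rw [List.length_drop]; omega) =
      l[l.length - 1]'(by omega) := by
    rw [List.getElem_drop]
    congr 1
    omega
  rw [← h2]
  exact List.getElem_mem _

theorem pvSuf_eq (l : List (List Char)) (hn : 2 ≤ l.length) :
    ∀ (k : Nat), k ≤ l.length - 1 →
      pvSufArr (l.getD (l.length - 1) []) l l.length k = pvP (l.drop (l.length - 1 - k)) := by
  have hsl : l.getD (l.length - 1) [] = l[l.length - 1]'(by omega) :=
    List.getD_eq_getElem l [] (by omega)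
  intro k
  induction k with
  | zero =>
    intro _
    have hdrop : l.drop (l.length - 1 - 0) = [l[l.length - 1]'(by omega)] := by
      rw [Nat.sub_zero, List.drop_eq_getElem_cons (by omega : l.length - 1 < l.length),
        (by omega : l.length - 1 + 1 = l.length), List.drop_length]
    rw [hdrop]
    simp only [pvSufArr, pvP_cons, pvGmin_nil, hsl]
  | succ k ih =>
    intro hk
    have ihk := ih (by omega)
    have hidx : l.length - 1 - (k + 1) < l.length := by omega
    have hcons : l.drop (l.length - 1 - (k + 1)) =
        l[l.length - 1 - (k + 1)]'hidx :: l.drop (l.length - 1 - k) := by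
      rw [List.drop_eq_getElem_cons hidx,
        (by omega : l.length - 1 - (k + 1) + 1 = l.length - 1 - k)]
    have hmem : l[l.length - 1]'(by omega) ∈ l.drop (l.length - 1 - k) := by
      have h2 : (l.drop (l.length - 1 - k))[k]'(by rw [List.length_drop]; omega) =
          l[l.length - 1]'(by omega) := by
        rw [List.getElem_drop]
        congr 1
        omega
      rw [← h2]
      exact List.getElem_mem _
    cases hd : l.drop (l.length - 1 - k) with
    | nil => rw [hd] at hmem; cases hmem
    | cons b B' =>
      rw [hd] at hmem
      simp only [pvSufArr]
      rw [ihk, hcons, hd]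
      rw [pvP_rep _ b (l[l.length - 1]'(by omega)) B' hmem]
      rw [List.getD_eq_getElem l [] hidx, hsl,
        pvLcp_comm (l[l.length - 1]'(by omega)) (l[l.length - 1 - (k + 1)]'hidx)]
      omega

-- ---- the candidate value: LCP of the list with entry i replaced by u ----

theorem pvP_set (l : List (List Char)) (hn : 2 ≤ l.length) (i : Nat) (hi : i < l.length)
    (u rep : List Char) (hrep : rep ∈ l.take i ++ l.drop (i + 1)) :
    pvP (l.set i u) = min (pvLcp u rep) (pvP (l.take i ++ l.drop (i + 1))) := by
  rw [List.set_eq_take_cons_drop u hi]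
  rw [pvP_perm List.perm_middle]
  cases hoth : l.take i ++ l.drop (i + 1) with
  | nil =>
    exfalso
    have : (l.take i ++ l.drop (i + 1)).length = l.length - 1 := by
      simp; omega
    rw [hoth] at this
    simp at this
    omega
  | cons o os =>
    rw [← hoth]
    rw [hoth] at hrep ⊢
    exact pvP_rep u o rep os hrep

-- the base LCP: A's find_lcp_length of the whole list equals B's pre[n-1]
theorem pvInit_eq (l : List (List Char)) (hn : 2 ≤ l.length) :
    pvFindLcp l = pvPreArr (l.getD 0 []) l (l.length - 1) := by
  rw [pvFindLcp_eq, pvPre_eq l (l.length - 1) (by omega)]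
  cases l with
  | nil => simp at hn
  | cons a r =>
    simp only [List.getD_cons_zero, List.drop_one, List.tail_cons, pvP_cons]
    rw [List.take_of_length_le (by simp)]

-- length of s[:j] + s[j+1:]
theorem pvModLen (s : List Char) (j : Nat) (hj : j < s.length) :
    (PySem.List.slice s none (some (j : Int)) ++
      PySem.List.slice s (some ((j : Int) + 1)) none).length = s.length - 1 := by
  have hcast : (j : Int) + 1 = ((j + 1 : Nat) : Int) := by push_cast; ring
  rw [PySem.List.slice_to_natCast, hcast, PySem.List.slice_from_natCast]
  simp only [List.length_append, List.length_take, List.length_drop]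
  omega

-- the per-deletion candidate: A's LCP of the patched list equals B's min(r, lcp2(u, rep))
theorem pvCand_eq (l : List (List Char)) (hn : 2 ≤ l.length) (i : Nat) (hi : i < l.length)
    (u : List Char) :
    pvFindLcp (l.set i u) =
      min (if i = 0 then pvSufArr (l.getD (l.length - 1) []) l l.length (l.length - 1 - 1)
           else if i = l.length - 1 then pvPreArr (l.getD 0 []) l (l.length - 2)
           else min (pvPreArr (l.getD 0 []) l (i - 1))
                (min (pvLcp (l.getD 0 []) (l.getD (l.length - 1) []))
                  (pvSufArr (l.getD (l.length - 1) []) l l.length (l.length - 1 - (i + 1)))))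
        (pvLcp u (if i = 0 then l.getD (l.length - 1) [] else l.getD 0 [])) := by
  have hs0 : l.getD 0 [] = l[0]'(by omega) := List.getD_eq_getElem l [] (by omega)
  have hsl : l.getD (l.length - 1) [] = l[l.length - 1]'(by omega) :=
    List.getD_eq_getElem l [] (by omega)
  have hL : l = l[0]'(by omega) :: l.drop 1 := by
    conv_lhs => rw [← List.drop_zero (l := l), List.drop_eq_getElem_cons (by omega : 0 < l.length)]
  rw [pvFindLcp_eq]
  rcases i with _ | i'
  · -- i = 0 : the others are l.drop 1, represented by the last string
    rw [if_pos rfl, if_pos rfl]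
    have hrep : l.getD (l.length - 1) [] ∈ l.take 0 ++ l.drop (0 + 1) := by
      simp only [List.take_zero, List.nil_append]
      exact pvLastMemDrop l 1 (by omega) (by omega)
    rw [pvP_set l hn 0 hi u _ hrep]
    have hsuf := pvSuf_eq l hn (l.length - 1 - 1) (by omega)
    rw [(by omega : l.length - 1 - (l.length - 1 - 1) = 1)] at hsuf
    rw [hsuf]
    simp only [List.take_zero, List.nil_append, Nat.zero_add]
    omega
  · -- i = i' + 1
    have htake : l.take (i' + 1) = l[0]'(by omega) :: (l.drop 1).take i' := by
      conv_lhs => rw [hL]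
      exact List.take_succ_cons
    have hrep : l.getD 0 [] ∈ l.take (i' + 1) ++ l.drop (i' + 1 + 1) := by
      rw [hs0, htake]
      exact List.mem_append_left _ List.mem_cons_self
    rw [pvP_set l hn (i' + 1) hi u _ hrep]
    have hne0 : ¬ (i' + 1 = 0) := by omega
    simp only [if_neg hne0]
    by_cases hlast : i' + 1 = l.length - 1
    · rw [if_pos hlast]
      rw [(by omega : i' + 1 + 1 = l.length), List.drop_length, List.append_nil, htake]
      have hpre := pvPre_eq l i' (by omega)
      rw [(by omega : l.length - 2 = i'), hpre, pvP_cons, hs0]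
      omega
    · rw [if_neg hlast]
      have hmem : l.getD (l.length - 1) [] ∈ l.drop (i' + 1 + 1) :=
        pvLastMemDrop l (i' + 1 + 1) (by omega) (by omega)
      cases hd : l.drop (i' + 1 + 1) with
      | nil => rw [hd] at hmem; cases hmem
      | cons b B' =>
        rw [hd] at hmem
        rw [htake]
        rw [pvP_merge ((l.drop 1).take i') (l[0]'(by omega)) b B' (l.getD (l.length - 1) []) hmem]
        have hpre := pvPre_eq l i' (by omega)
        have hsuf := pvSuf_eq l hn (l.length - 1 - (i' + 1 + 1)) (by omega)
        rw [(by omega : l.length - 1 - (l.length - 1 - (i' + 1 + 1)) = i' + 1 + 1), hd] at hsuf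
        rw [(by omega : i' + 1 - 1 = i'), hpre, hsuf, pvP_cons, hs0, hsl]
        omega

theorem pvMaxIf (m x : Nat) : max m x = if m < x then x else m := by
  by_cases h : m < x
  · rw [if_pos h]; omega
  · rw [if_neg h]; omega

theorem pvMain_eq_big (l : List (List Char)) (hn : 2 ≤ l.length) : pvMainA l = pvMainB l := by
  have h0 : ¬ (l.length = 0) := by omega
  have h1 : ¬ (l.length = 1) := by omega
  simp only [pvMainA, pvMainB, if_neg h0, if_neg h1]
  rw [pvInit_eq l hn]
  apply PySem.List.foldl_congr_mem
  intro acc i hi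
  have hi' : i < l.length := List.mem_range.mp hi
  by_cases hs : (l.getD i []).length = 0
  · rw [if_pos hs, hs]
    simp only [List.range_zero, List.foldl_nil]
  · rw [if_neg hs]
    apply PySem.List.foldl_congr_mem
    intro acc2 j hj
    rw [pvCand_eq l hn i hi' _]
    exact pvMaxIf _ _

theorem pvMain_eq (l : List (List Char)) : pvMainA l = pvMainB l := by
  match l with
  | [] => rfl
  | [s] =>
    show (if s.length = 0 then s.length
          else (List.range s.length).foldl
            (fun acc2 (j : Nat) => max acc2 (pvFindLcp ([s].set 0
              (PySem.List.slice s none (some (j : Int)) ++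
                PySem.List.slice s (some ((j : Int) + 1)) none)))) s.length) = s.length
    split
    · rfl
    · apply pvFoldMax_le
      intro j hj
      have hj' : j < s.length := List.mem_range.mp hj
      rw [List.set_cons_zero]
      have hlen := pvModLen s j hj'
      show (PySem.List.slice s none (some (j : Int)) ++
        PySem.List.slice s (some ((j : Int) + 1)) none).length ≤ s.length
      omega
  | a :: b :: t => exact pvMain_eq_big (a :: b :: t) (by simp)

-- ===== VERDICT (by name: the statement is the Claim_ definition above) =====
theorem longestCommonPrefixAfterOneRemoval_spec : Claim_equal_longestCommonPrefixAfterOneRemoval := by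
  intro strs _
  show _ = _
  unfold longestCommonPrefixAfterOneRemoval longestCommonPrefixAfterOneRemoval_alt
  exact congrArg _ (pvMain_eq _)
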